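-- pv_equiv track=rewrite | github.com/postcode-x/mmx3-password-generator | main.py | hash_subroutine
-- ===== SOURCE A (Python) =====
-- def hash_subroutine(test_hex, index, n):
--
--     zf = 0
--     _1e94 = hex(int(test_hex[index], 16))
--     _1e87 = test_hex[3]
--     tmp = _1e87
--     for i in range(0, n):
--         tmp = hex(int(tmp, 16) >> 1)
--     _1e95 = hex(int(tmp, 16) & int('0x01', 16))
--     count_x = 0
--     tmp = _1e94
--     tmp, cf = hex(int(tmp, 16) >> 1), int(tmp, 16) & 1
--     if cf == 1:
--         count_x += 1
--     while int(tmp, 16) != 0: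
--         tmp, cf = hex(int(tmp, 16) >> 1), int(tmp, 16) & 1
--         if cf == 1:
--             count_x += 1
--     res1 = count_x ^ int(_1e95, 16)
--     res2, cf = hex(res1 & int('0x1', 16)), int(hex(res1), 16) & 1
--     if res2 == '0x0':
--         zf = 1
--     return zf
-- ===== SOURCE B (Python) =====
-- def hash_subroutine(test_hex, index, n):
--     val = int(test_hex[index], 16)
--     bit = (int(test_hex[3], 16) >> max(n, 0)) & 1
--     return 1 - ((val.bit_count() ^ bit) & 1)
-- ===== Notes on version B (the rewrite author's own statement) =====
-- stated objective: simpler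
-- what changed: Replaces the hex-string round-tripping, the n-iteration shift loop and the manual shift-and-mask popcount while-loop by direct arithmetic: one shift by max(n,0) and the built-in int.bit_count(), returning 1 - ((popcount ^ bit) & 1); no hex()/int() string conversions.
import Mathlib
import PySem

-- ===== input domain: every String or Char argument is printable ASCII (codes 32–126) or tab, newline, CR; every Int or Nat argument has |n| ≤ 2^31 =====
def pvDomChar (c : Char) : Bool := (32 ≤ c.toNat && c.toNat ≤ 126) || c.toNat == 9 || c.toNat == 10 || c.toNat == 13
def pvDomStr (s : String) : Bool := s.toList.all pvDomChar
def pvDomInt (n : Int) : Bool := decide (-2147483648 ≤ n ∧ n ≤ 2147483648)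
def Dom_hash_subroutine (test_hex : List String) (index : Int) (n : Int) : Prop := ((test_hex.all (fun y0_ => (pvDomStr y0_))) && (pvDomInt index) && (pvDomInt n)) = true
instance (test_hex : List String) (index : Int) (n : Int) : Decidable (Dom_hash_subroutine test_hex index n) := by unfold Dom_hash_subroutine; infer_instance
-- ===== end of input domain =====

-- B replaces A's hex-string round-tripping, shift loop and manual popcount while-loop by
-- one direct shift and the built-in popcount (objective: simpler).

-- ===== PORT A =====
-- A's while loop (after the unconditional first shift/mask step); state is the numeric
-- value of the hex string (hex()/int(·,16) round-trip is the identity, exact), which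
-- Pre_ guarantees is ≥ 0, hence Nat.
def hashWhile (tmp count : Nat) : Nat :=
  if tmp ≠ 0 then hashWhile (tmp / 2) (count + tmp % 2) else count
termination_by tmp
decreasing_by exact Nat.div_lt_self (by omega) (by omega)

def hash_subroutine (test_hex : List String) (index : Int) (n : Int) : Int :=
  let zf : Int := 0
  -- int(test_hex[i], 16): none = IndexError or ValueError (exact)
  match (PySem.List.pyGet? test_hex index).bind (fun s => PySem.Int.ofStrBase? s 16),
        (PySem.List.pyGet? test_hex 3).bind (fun s => PySem.Int.ofStrBase? s 16) with
  | some v94, some v87 =>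
      -- for i in range(0, n): tmp = hex(int(tmp,16) >> 1)   (numeric state, exact)
      let tmp := (PySem.List.pyRange 0 n 1).foldl (fun (t : Int) _ => t >>> (1:Nat)) v87
      let v95 := PySem.Int.band tmp 1
      if _hv : 0 ≤ v94 then
        -- unconditional first step: tmp, cf = v >> 1, v & 1; if cf == 1: count_x += 1
        let count_x := hashWhile (v94.toNat / 2) (v94.toNat % 2)
        let res1 := PySem.Int.bxor (count_x : Int) v95
        -- res2 == '0x0'  ⟺  res1 & 1 == 0  (res1 ≥ 0 here, exact)
        if PySem.Int.band res1 1 = 0 then 1 else zf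
      else zf  -- v94 < 0: Python's while loop never terminates; excluded by Pre_
  | _, _ => zf  -- IndexError / ValueError; excluded by Pre_

-- ===== PORT B =====
def hash_subroutine_alt (test_hex : List String) (index : Int) (n : Int) : Int :=
  -- int(test_hex[i], 16): none = IndexError or ValueError (exact)
  match (PySem.List.pyGet? test_hex index).bind (fun s => PySem.Int.ofStrBase? s 16) with
  | none => 0  -- IndexError / ValueError; excluded by Pre_
  | some val =>
    match (PySem.List.pyGet? test_hex 3).bind (fun s => PySem.Int.ofStrBase? s 16) with
    | none => 0  -- IndexError / ValueError; excluded by Pre_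
    | some w3 =>
        let bit := PySem.Int.band (w3 >>> (max n 0).toNat) 1
        1 - PySem.Int.band (PySem.Int.bxor (PySem.Int.bitCount val : Int) bit) 1

-- ===== PRECONDITION & SPEC =====
-- Pre_ excludes inputs where A raises (test_hex[index] / test_hex[3] missing or not a
-- valid base-16 literal) and inputs where int(test_hex[index],16) < 0, on which A's
-- popcount while-loop never terminates.
def Pre_hash_subroutine (test_hex : List String) (index : Int) (n : Int) : Prop :=
  0 ≤ ((PySem.List.pyGet? test_hex index).bind (fun s => PySem.Int.ofStrBase? s 16)).getD (-1) ∧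
  ((PySem.List.pyGet? test_hex 3).bind (fun s => PySem.Int.ofStrBase? s 16)).isSome = true

instance (test_hex : List String) (index : Int) (n : Int) : Decidable (Pre_hash_subroutine test_hex index n) := by unfold Pre_hash_subroutine; infer_instance

def pvWitness_hash_subroutine : List String × Int × Int := (["1a", "0", "ff", "7"], 0, 2)

def Spec_hash_subroutine (test_hex : List String) (index : Int) (n : Int) (out : Int) : Prop := out = hash_subroutine_alt test_hex index n
instance (test_hex : List String) (index : Int) (n : Int) (out : Int) : Decidable (Spec_hash_subroutine test_hex index n out) := by unfold Spec_hash_subroutine; infer_instance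

-- ===== CLAIM (what is proved, stated in full; the proofs are below) =====
def Claim_equal_hash_subroutine : Prop := ∀ (test_hex : List String) (index : Int) (n : Int), Dom_hash_subroutine test_hex index n → Pre_hash_subroutine test_hex index n → Spec_hash_subroutine test_hex index n (hash_subroutine test_hex index n)

-- ===== LEMMAS AND PROOFS =====

-- the n-iteration shift loop is one shift by the list length
theorem foldl_shiftRight_one {α : Type} (l : List α) (w : Int) :
    l.foldl (fun (t : Int) _ => t >>> (1:Nat)) w = w >>> l.length := by
  induction l generalizing w with
  | nil => simp
  | cons a l ih =>
      simp only [List.foldl_cons, ih, List.length_cons]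
      rw [show l.length + 1 = 1 + l.length from by omega, Int.shiftRight_add]

-- A's do-while popcount equals bit_count
theorem hashWhile_eq (tmp count : Nat) :
    hashWhile tmp count = count + PySem.Int.bitCount (tmp : Int) := by
  fun_induction hashWhile with
  | case1 tmp count h ih =>
      rw [ih, PySem.Int.bitCount_natCast (m := tmp) (by omega)]
      omega
  | case2 tmp count h =>
      simp only [ne_eq, not_not] at h
      subst h
      simp [PySem.Int.bitCount_zero]

-- ===== VERDICT (by name: the statement is the Claim_ definition above) =====
theorem hash_subroutine_spec : Claim_equal_hash_subroutine := by
  intro test_hex index n _ hpre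
  obtain ⟨h1, h2⟩ := hpre
  unfold Spec_hash_subroutine hash_subroutine hash_subroutine_alt
  cases hA : (PySem.List.pyGet? test_hex index).bind (fun s => PySem.Int.ofStrBase? s 16) with
  | none => rw [hA] at h1
  | some v =>
    cases hB : (PySem.List.pyGet? test_hex 3).bind (fun s => PySem.Int.ofStrBase? s 16) with
    | none => rw [hB] at h2
    | some w =>
      rw [hA, Option.getD_some] at h1
      simp only
      rw [dif_pos h1]
      rw [foldl_shiftRight_one, PySem.List.length_pyRange_one,
          hashWhile_eq]
      have hlen : (n - 0).toNat = (max n 0).toNat := by omega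
      rw [hlen]
      have hv : ((v.toNat : Int)) = v := Int.toNat_of_nonneg h1
      have hcnt : (↑(v.toNat % 2 + PySem.Int.bitCount ((v.toNat / 2 : Nat) : Int)) : Int)
          = (PySem.Int.bitCount v : Int) := by
        by_cases h0 : v.toNat = 0
        · have hv0 : v = 0 := by omega
          rw [hv0]; decide
        · rw [← PySem.Int.bitCount_natCast (m := v.toNat) (by omega), hv]
      rw [hcnt]
      set r := PySem.Int.bxor (↑(PySem.Int.bitCount v)) (PySem.Int.band (w >>> (max n 0).toNat) 1) with hr
      have hb : PySem.Int.band r 1 = PySem.Int.mod r 2 := PySem.Int.band_one r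
      have hm : 0 ≤ PySem.Int.mod r 2 ∧ PySem.Int.mod r 2 < 2 :=
        ⟨PySem.Int.mod_nonneg r (by norm_num), PySem.Int.mod_lt r (by norm_num)⟩
      rw [hb]
      split_ifs with h <;> omega
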